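-- pv_equiv track=rewrite | github.com/ATKuom/Python-Code | thermo_validity.py | basic_structure
-- ===== SOURCE A (Python) =====
-- BASIC_LIST = ["T", "A", "C", "H"]
--
-- def basic_structure(sequence, char_occur_dict):
--     """
--     Checking if all the units of a Brayton Cycle present and properly sequenced.
--     T->A->C->H
--     Input: String representation of a layout
--     Return: True or False
--     """
--     if "G" in char_occur_dict.keys():
--         if char_occur_dict["G"] != 1:
--             return False
--     if "E" in char_occur_dict.keys():
--         if char_occur_dict["E"] != 1:
--             return False
--     starting_index = 0
--     for elements in BASIC_LIST:
--         starting_index = sequence.find(elements, starting_index)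
--         if starting_index == -1:
--             return False
--
--     return True
-- ===== SOURCE B (Python) =====
-- def basic_structure(sequence, char_occur_dict):
--     """
--     Same check, different decomposition: one forward scan over the text with a
--     pattern pointer instead of repeated str.find jumps over the pattern.
--     """
--     for k in ("G", "E"):
--         if k in char_occur_dict and char_occur_dict[k] != 1:
--             return False
--     pattern = "TACH"
--     j = 0
--     for ch in sequence:
--         if ch == pattern[j]:
--             j += 1
--             if j == len(pattern):
--                 return True
--     return False
-- ===== Notes on version B (the rewrite author's own statement) =====
-- stated objective: alternative
-- what changed: The pattern-driven find-chain (loop over BASIC_LIST, jumping with str.find from the last match) is replaced by a single forward scan over the text with a pattern pointer that advances on each match, and the two separate G/E count guards become one loop over the two keys.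
import Mathlib
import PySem

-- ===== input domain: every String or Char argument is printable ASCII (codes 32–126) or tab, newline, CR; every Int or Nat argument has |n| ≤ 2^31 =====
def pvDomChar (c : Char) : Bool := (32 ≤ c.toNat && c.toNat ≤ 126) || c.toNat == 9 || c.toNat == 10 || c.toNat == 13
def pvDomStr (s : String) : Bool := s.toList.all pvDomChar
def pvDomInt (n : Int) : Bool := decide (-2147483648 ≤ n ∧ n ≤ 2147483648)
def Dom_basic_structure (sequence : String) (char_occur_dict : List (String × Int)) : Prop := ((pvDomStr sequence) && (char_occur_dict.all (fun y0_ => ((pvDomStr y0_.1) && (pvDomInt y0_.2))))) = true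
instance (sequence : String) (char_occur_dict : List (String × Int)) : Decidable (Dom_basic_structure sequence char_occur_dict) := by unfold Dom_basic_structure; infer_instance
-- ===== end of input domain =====

-- B replaces A's find-chain over BASIC_LIST by one forward scan of the text with a pattern pointer (alternative decomposition, same cost).

-- ===== PORT A =====
def pvBASIC_LIST : List String := ["T", "A", "C", "H"]

-- the for-loop over BASIC_LIST carrying starting_index, jumping via sequence.find(elements, starting_index)
def pvFindLoop (sequence : String) : List String → Int → Bool
  | [], _ => true
  | e :: rest, si =>
    let si' := PySem.Str.findFrom sequence e si none
    if si' = -1 then false else pvFindLoop sequence rest si'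

def basic_structure (sequence : String) (char_occur_dict : List (String × Int)) : Bool :=
  let d := PySem.Dict.ofList char_occur_dict
  if d.contains "G" && (d.get? "G" ≠ some 1 : Bool) then false
  else if d.contains "E" && (d.get? "E" ≠ some 1 : Bool) then false
  else pvFindLoop sequence pvBASIC_LIST 0

-- ===== PORT B =====
-- the for-loop over sequence's characters carrying the pattern pointer j
def pvAltScan (pat : List Char) : List Char → Nat → Bool
  | [], _ => false
  | c :: cs, j =>
    if pat[j]? = some c then
      (if j + 1 = pat.length then true else pvAltScan pat cs (j + 1))
    else pvAltScan pat cs j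

def basic_structure_alt (sequence : String) (char_occur_dict : List (String × Int)) : Bool :=
  let d := PySem.Dict.ofList char_occur_dict
  if (["G", "E"] : List String).all
      (fun k => !(d.contains k && (d.get? k ≠ some 1 : Bool))) then
    pvAltScan "TACH".toList sequence.toList 0
  else false

-- ===== PRECONDITION & SPEC =====
def Spec_basic_structure (sequence : String) (char_occur_dict : List (String × Int)) (out : Bool) : Prop := out = basic_structure_alt sequence char_occur_dict
instance (sequence : String) (char_occur_dict : List (String × Int)) (out : Bool) : Decidable (Spec_basic_structure sequence char_occur_dict out) := by unfold Spec_basic_structure; infer_instance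

-- ===== CLAIM (what is proved, stated in full; the proofs are below) =====
def Claim_equal_basic_structure : Prop := ∀ (sequence : String) (char_occur_dict : List (String × Int)), Dom_basic_structure sequence char_occur_dict → Spec_basic_structure sequence char_occur_dict (basic_structure sequence char_occur_dict)

-- ===== LEMMAS AND PROOFS =====

-- the canonical greedy subsequence scan, the common reference point of both loops
def pvGreedy : List Char → List Char → Bool
  | [], _ => true
  | _ :: _, [] => false
  | p :: ps, c :: cs => if c = p then pvGreedy ps cs else pvGreedy (p :: ps) cs

theorem pvGreedy_nil (l : List Char) : pvGreedy [] l = true := by cases l <;> rfl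

-- B's indexed scan is greedy on the remaining pattern
theorem pvAltScan_eq_greedy (pat : List Char) (l : List Char) :
    ∀ j, j < pat.length → pvAltScan pat l j = pvGreedy (pat.drop j) l := by
  induction l with
  | nil =>
    intro j hj
    simp only [pvAltScan]
    cases hd : pat.drop j with
    | nil => exact absurd (by simpa using congrArg List.length hd) (by omega)
    | cons p ps => simp [pvGreedy]
  | cons c cs ih =>
    intro j hj
    have hdrop : pat.drop j = pat[j] :: pat.drop (j + 1) := List.drop_eq_getElem_cons hj
    have hget : pat[j]? = some pat[j] := List.getElem?_eq_getElem hj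
    by_cases hc : c = pat[j]
    · subst hc
      rw [pvAltScan, if_pos hget, hdrop]
      by_cases hlast : j + 1 = pat.length
      · have hnil : pat.drop (j + 1) = [] := by simp [hlast]
        simp [hlast, pvGreedy, pvGreedy_nil]
      · rw [if_neg hlast, ih (j + 1) (by omega), pvGreedy, if_pos rfl]
    · rw [pvAltScan, if_neg (by rw [hget]; exact fun h => hc (Option.some.inj h).symm),
        ih j hj, hdrop, pvGreedy, if_neg hc, ← hdrop]

-- singleton prefix = first element
theorem singleton_prefix_iff (e : Char) (u : List Char) : [e] <+: u ↔ u.head? = some e := by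
  cases u with
  | nil => simp
  | cons c cs => simp [List.cons_prefix_cons, eq_comm]

theorem singleton_prefix_drop_iff (e : Char) (t : List Char) (j : Nat) :
    [e] <+: t.drop j ↔ t[j]? = some e := by
  rw [singleton_prefix_iff, List.head?_drop]

-- greedy fails when the head is absent
theorem pvGreedy_of_not_mem (e : Char) (rest t : List Char) (h : e ∉ t) :
    pvGreedy (e :: rest) t = false := by
  induction t with
  | nil => rfl
  | cons c cs ih =>
    have hcne : ¬ c = e := fun hc => h (by simp [← hc])
    rw [pvGreedy, if_neg hcne, ih (fun hm => h (List.mem_cons_of_mem _ hm))]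

-- greedy consumes the FIRST occurrence of its head
theorem pvGreedy_first (e : Char) (rest : List Char) :
    ∀ (t : List Char) (i : Nat), i < t.length → t[i]? = some e → (∀ j < i, t[j]? ≠ some e) →
      pvGreedy (e :: rest) t = pvGreedy rest (t.drop (i + 1)) := by
  intro t
  induction t with
  | nil => intro i hi; simp at hi
  | cons c cs ih =>
    intro i hi hget hfirst
    cases i with
    | zero =>
      simp at hget
      rw [pvGreedy, if_pos hget]
      simp
    | succ i' =>
      have hc : ¬ c = e := fun hc => hfirst 0 (by omega) (by simp [hc])
      rw [pvGreedy, if_neg hc]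
      have := ih i' (by simpa using hi) (by simpa using hget)
        (fun j hj => by have := hfirst (j + 1) (by omega); simpa using this)
      simpa using this

-- infix of a singleton is membership
theorem singleton_infix_iff (e : Char) (t : List Char) : [e] <:+: t ↔ e ∈ t := by
  constructor
  · intro h; exact h.sublist.subset List.mem_cons_self
  · intro h
    obtain ⟨u, v, huv⟩ := List.append_of_mem h
    exact ⟨u, v, by simp [huv]⟩

-- A's find-chain equals greedy, for an adjacently-distinct pattern of single characters
theorem pvFindLoop_eq_greedy (s : String) :
    ∀ (pat : List Char), pat.IsChain (· ≠ ·) →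
      ∀ (k : Nat), k ≤ s.toList.length →
        pvFindLoop s (pat.map (fun c => String.ofList [c])) (k : Int) = pvGreedy pat (s.toList.drop k) := by
  intro pat
  induction pat with
  | nil => intro _ k _; simp [pvFindLoop, pvGreedy_nil]
  | cons e rest ih =>
    intro hch k hk
    have hnat := PySem.Chars.findFrom_natCast s.toList [e] k hk
    rw [List.map_cons, pvFindLoop]
    simp only [PySem.Str.findFrom_eq]
    have htl : (String.ofList [e]).toList = [e] := by simp
    rw [htl, hnat]
    set t := s.toList.drop k with ht
    by_cases hfind : PySem.Chars.find t [e] = -1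
    · rw [if_pos hfind]
      have hmem : e ∉ t := by
        have := (PySem.Chars.find_eq_neg_one_iff t [e]).mp hfind
        rw [singleton_infix_iff] at this; exact this
      simp [pvGreedy_of_not_mem e rest t hmem]
    · rw [if_neg hfind]
      have hpos : 0 ≤ PySem.Chars.find t [e] := by
        rcases (PySem.Chars.neg_one_le_find t [e]).lt_or_eq with h | h
        · omega
        · exact absurd h.symm hfind
      set i := (PySem.Chars.find t [e]).toNat with hi
      have hcast : PySem.Chars.find t [e] = (i : Int) := (Int.toNat_of_nonneg hpos).symm
      obtain ⟨hpre, hmin⟩ := PySem.Chars.find_spec (s := t) (sub := [e]) hpos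
      have hti : t[i]? = some e := (singleton_prefix_drop_iff e t i).mp hpre
      have hilt : i < t.length := by
        by_contra hn
        rw [List.getElem?_eq_none (by omega)] at hti; simp at hti
      have hfirst : ∀ j < i, t[j]? ≠ some e := fun j hj hget =>
        hmin j hj ((singleton_prefix_drop_iff e t j).mpr hget)
      have hlen : t.length = s.toList.length - k := by simp [ht]
      have hki : k + i < s.toList.length := by omega
      have hsi : s.toList[k + i]? = some e := by
        rw [← hti, ht, List.getElem?_drop]
      have hne : (↑k + PySem.Chars.find t [e] : Int) ≠ -1 := by rw [hcast]; omega
      rw [if_neg hne, hcast]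
      have hc2 : (↑k + (↑i : Int)) = ((k + i : Nat) : Int) := by push_cast; ring
      rw [hc2, ih hch.tail (k + i) (by omega)]
      rw [pvGreedy_first e rest t i hilt hti hfirst]
      have hdropdrop : t.drop (i + 1) = s.toList.drop (k + i + 1) := by
        rw [ht, List.drop_drop]; ring_nf
      have hdecomp : s.toList.drop (k + i) = e :: s.toList.drop (k + i + 1) := by
        rw [List.drop_eq_getElem_cons hki]
        have : s.toList[k + i] = e := by
          have hg := List.getElem?_eq_getElem hki
          rw [hg] at hsi; exact Option.some.inj hsi
        rw [this]
      rw [hdropdrop, hdecomp]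
      cases rest with
      | nil => simp [pvGreedy_nil]
      | cons q qs =>
        have hqe : e ≠ q := (List.isChain_cons_cons.mp hch).1
        rw [pvGreedy, if_neg hqe]

-- the two scans agree on the concrete pattern
theorem core_eq (s : String) :
    pvFindLoop s pvBASIC_LIST 0 = pvAltScan "TACH".toList s.toList 0 := by
  have hch : List.IsChain (· ≠ ·) ['T', 'A', 'C', 'H'] := by decide
  have hB := pvAltScan_eq_greedy "TACH".toList s.toList 0 (by decide)
  have hA := pvFindLoop_eq_greedy s ['T', 'A', 'C', 'H'] hch 0 (by omega)
  have hmap : (['T', 'A', 'C', 'H'].map (fun c => String.ofList [c])) = pvBASIC_LIST := by decide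
  have hpat : "TACH".toList = ['T', 'A', 'C', 'H'] := by decide
  rw [hmap, Nat.cast_zero, List.drop_zero] at hA
  rw [List.drop_zero] at hB
  rw [hA, hpat] at *
  exact hB.symm

-- ===== VERDICT (by name: the statement is the Claim_ definition above) =====
theorem basic_structure_spec : Claim_equal_basic_structure := by
  intro sequence char_occur_dict _
  unfold Spec_basic_structure basic_structure basic_structure_alt
  set d := PySem.Dict.ofList char_occur_dict with hd
  cases hcG : d.contains "G" <;> cases hcE : d.contains "E" <;>
    by_cases hvG : d.get? "G" = some 1 <;> by_cases hvE : d.get? "E" = some 1 <;>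
      simp [List.all, hcG, hcE, hvG, hvE, core_eq sequence]
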